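-- pv_equiv track=rewrite | github.com/Voktir/goit-pnc-hw-02 | 3_table_vig.py | get_matrix_positions
-- ===== SOURCE A (Python) =====
-- def get_matrix_positions(matrix):
--     """Отримує позиції символів в матриці в порядку зростання"""
--     positions = {}
--     size = len(matrix)
--
--     chars_with_positions = []
--     for i in range(size):
--         for j in range(size):
--             if matrix[i][j]:
--                 chars_with_positions.append((matrix[i][j], i, j))
--
--     chars_with_positions.sort(key=lambda x: x[0])
--
--     for index, (char, i, j) in enumerate(chars_with_positions):
--         positions[index] = (i, j)
--
--     return positions
-- ===== SOURCE B (Python) =====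
-- def get_matrix_positions(matrix):
--     """Отримує позиції символів в матриці в порядку зростання"""
--     size = len(matrix)
--     chars = {matrix[i][j] for i in range(size) for j in range(size) if matrix[i][j]}
--     positions = {}
--     index = 0
--     for ch in sorted(chars):
--         for i in range(size):
--             for j in range(size):
--                 if matrix[i][j] == ch:
--                     positions[index] = (i, j)
--                     index += 1
--     return positions
-- ===== Notes on version B (the rewrite author's own statement) =====
-- stated objective: alternative
-- what changed: B never sorts cell tuples and stores no per-cell collection: it collects the set of distinct nonempty characters, sorts only those keys, and then for each key in order rescans the whole matrix row-major, emitting matching positions with an incrementing index; the row-major rescan order reproduces A's stable-sort tie-breaking.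
import Mathlib
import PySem

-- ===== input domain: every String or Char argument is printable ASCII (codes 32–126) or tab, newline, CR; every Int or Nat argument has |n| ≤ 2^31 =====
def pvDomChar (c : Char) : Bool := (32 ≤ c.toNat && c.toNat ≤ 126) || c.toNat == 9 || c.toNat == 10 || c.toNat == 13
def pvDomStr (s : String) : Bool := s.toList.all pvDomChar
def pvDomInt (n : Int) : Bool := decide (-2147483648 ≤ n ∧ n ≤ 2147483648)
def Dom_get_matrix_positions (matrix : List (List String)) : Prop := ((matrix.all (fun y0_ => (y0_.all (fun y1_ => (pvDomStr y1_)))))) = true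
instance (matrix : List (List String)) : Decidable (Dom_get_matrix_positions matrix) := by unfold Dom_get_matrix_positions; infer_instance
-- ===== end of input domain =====

-- B sorts only the distinct nonempty characters and then rescans the matrix row-major once
-- per sorted character, emitting matching positions with a running index, instead of
-- comparison-sorting the flat list of (char, i, j) triples (objective: alternative).
-- Return-value equivalence only; neither version mutates its argument.

-- ===== PORT A =====
def get_matrix_positions (matrix : List (List String)) : List (Int × Int × Int) :=
  let size : Int := matrix.length
  let cwp : List (String × Int × Int) :=
    (PySem.List.pyRange 0 size 1).foldl (fun acc i =>
      (PySem.List.pyRange 0 size 1).foldl (fun acc j =>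
        if (PySem.List.pyGetD (PySem.List.pyGetD matrix i []) j "").toList ≠ [] then
          acc ++ [(PySem.List.pyGetD (PySem.List.pyGetD matrix i []) j "", i, j)]
        else acc) acc) []
  let sortedL := PySem.List.sorted cwp (fun x => x.1)
  ((PySem.List.enumerate sortedL).foldl (fun d p => d.insert p.1 p.2.2) PySem.Dict.empty).items

-- ===== PORT B =====
def get_matrix_positions_alt (matrix : List (List String)) : List (Int × Int × Int) :=
  let size : Int := matrix.length
  let chars : PySem.Set String :=
    (PySem.List.pyRange 0 size 1).foldl (fun s i =>
      (PySem.List.pyRange 0 size 1).foldl (fun s j =>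
        if (PySem.List.pyGetD (PySem.List.pyGetD matrix i []) j "").toList ≠ [] then
          PySem.Set.add s (PySem.List.pyGetD (PySem.List.pyGetD matrix i []) j "")
        else s) s) PySem.Set.empty
  let st : PySem.Dict Int (Int × Int) × Int :=
    (PySem.List.sorted chars (fun k => k)).foldl (fun st ch =>
      (PySem.List.pyRange 0 size 1).foldl (fun st i =>
        (PySem.List.pyRange 0 size 1).foldl (fun st j =>
          if PySem.List.pyGetD (PySem.List.pyGetD matrix i []) j "" == ch then
            (st.1.insert st.2 (i, j), st.2 + 1)
          else st) st) st)
      (PySem.Dict.empty, 0)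
  st.1.items

-- ===== PRECONDITION & SPEC =====
-- Pre_ excludes exactly the ragged matrices on which the Python A raises IndexError
-- (a row shorter than the number of rows is indexed out of range); A returns on all other inputs.
def Pre_get_matrix_positions (matrix : List (List String)) : Prop :=
  ∀ row ∈ matrix, matrix.length ≤ row.length
instance (matrix : List (List String)) : Decidable (Pre_get_matrix_positions matrix) := by
  unfold Pre_get_matrix_positions; infer_instance

def pvWitness_get_matrix_positions : List (List String) := [["b", "a"], ["a", ""]]

def Spec_get_matrix_positions (matrix : List (List String)) (out : List (Int × Int × Int)) : Prop := out = get_matrix_positions_alt matrix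
instance (matrix : List (List String)) (out : List (Int × Int × Int)) : Decidable (Spec_get_matrix_positions matrix out) := by unfold Spec_get_matrix_positions; infer_instance

-- ===== CLAIM (what is proved, stated in full; the proofs are below) =====
def Claim_equal_get_matrix_positions : Prop := ∀ (matrix : List (List String)), Dom_get_matrix_positions matrix → Pre_get_matrix_positions matrix → Spec_get_matrix_positions matrix (get_matrix_positions matrix)

-- ===== LEMMAS AND PROOFS =====

-- stable insert lands right after the last element whose key is ≤ its key
theorem pv_insertBy_between {α κ : Type} [LinearOrder κ] (key : α → κ) (x : α) (L R : List α)
    (hL : ∀ y ∈ L, key y ≤ key x) (hR : ∀ y ∈ R, key x < key y) :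
    PySem.List.insertBy (fun a b => decide (key a < key b)) x (L ++ R) = L ++ x :: R := by
  induction L with
  | nil =>
    cases R with
    | nil => simp [PySem.List.insertBy]
    | cons r rs => simp [PySem.List.insertBy, hR r (by simp)]
  | cons l ls ih =>
    have h1 : ¬ key x < key l := not_lt.2 (hL l (by simp))
    simp [PySem.List.insertBy, h1]
    exact ih (fun y hy => hL y (by simp [hy]))

-- a strictly increasing list is its < k part, then its = k part, then its > k part
theorem pv_pairwise_lt_decomp {κ : Type} [LinearOrder κ] [BEq κ] [LawfulBEq κ]
    (l : List κ) (k : κ) (h : l.Pairwise (· < ·)) :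
    l = l.filter (fun y => decide (y < k)) ++ l.filter (fun y => y == k)
        ++ l.filter (fun y => decide (k < y)) := by
  induction l with
  | nil => simp
  | cons a t ih =>
    have ht := h.of_cons
    have ha : ∀ y ∈ t, a < y := fun y hy => List.rel_of_pairwise_cons h hy
    rcases lt_trichotomy a k with hak | hak | hak
    · have hne : ¬ (a == k) = true := by simp [ne_of_lt hak]
      have := ih ht
      simp only [List.filter_cons]
      simp only [decide_eq_true_eq, if_pos hak, hne, Bool.false_eq_true, if_false,
        if_neg (not_lt.2 (le_of_lt hak))]
      rw [List.cons_append, List.cons_append]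
      exact congrArg (a :: ·) this
    · subst hak
      have h1 : t.filter (fun y => decide (y < a)) = [] := by
        rw [List.filter_eq_nil_iff]; intro y hy; simp [not_lt.2 (le_of_lt (ha y hy))]
      have h2 : t.filter (fun y => y == a) = [] := by
        rw [List.filter_eq_nil_iff]; intro y hy; simp [(ne_of_gt (ha y hy))]
      have h3 : t.filter (fun y => decide (a < y)) = t := by
        rw [List.filter_eq_self]; intro y hy; simp [ha y hy]
      simp [h1, h2, h3]
    · have h1 : (a :: t).filter (fun y => decide (y < k)) = [] := by
        rw [List.filter_eq_nil_iff]; intro y hy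
        rcases List.mem_cons.1 hy with rfl | hy
        · simp [not_lt.2 (le_of_lt hak)]
        · simp [not_lt.2 (le_of_lt (hak.trans (ha y hy)))]
      have h2 : (a :: t).filter (fun y => y == k) = [] := by
        rw [List.filter_eq_nil_iff]; intro y hy
        rcases List.mem_cons.1 hy with rfl | hy
        · simp [(ne_of_gt hak)]
        · simp [(ne_of_gt (hak.trans (ha y hy)))]
      have h3 : (a :: t).filter (fun y => decide (k < y)) = a :: t := by
        rw [List.filter_eq_self]; intro y hy
        rcases List.mem_cons.1 hy with rfl | hy
        · simp [hak]
        · simp [hak.trans (ha y hy)]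
      simp [h1, h2, h3]

-- sorted(set(m + [k])) is sorted(set(m)) with k spliced between its < k and > k parts
theorem pv_sorted_add_eq {κ : Type} [LinearOrder κ] [BEq κ] [LawfulBEq κ] (m : List κ) (k : κ) :
    PySem.List.sorted (PySem.Set.ofList (m ++ [k])) (fun y => y)
    = (PySem.List.sorted (PySem.Set.ofList m) (fun y => y)).filter (fun y => decide (y < k))
      ++ k :: (PySem.List.sorted (PySem.Set.ofList m) (fun y => y)).filter (fun y => decide (k < y)) := by
  set s := PySem.Set.ofList m with hs
  set t := PySem.List.sorted s (fun y : κ => y) with htdef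
  have ht : t.Pairwise (· < ·) := PySem.List.sorted_ofList_pairwise_lt m
  have htperm : t.Perm s := PySem.List.sorted_perm s (fun y => y) false
  have htnd : t.Nodup := htperm.nodup_iff.2 (PySem.Set.nodup_ofList m)
  have hdec := pv_pairwise_lt_decomp t k ht
  apply PySem.List.sorted_eq_of_perm_of_pairwise_lt
  · have hof : PySem.Set.ofList (m ++ [k]) = PySem.Set.add s k := by
      rw [hs, PySem.Set.ofList_eq_foldl, PySem.Set.ofList_eq_foldl, List.foldl_append]
      rfl
    rw [hof]
    by_cases hk : k ∈ s
    · have hkt : k ∈ t := (PySem.List.mem_sorted s (fun y => y) false k).2 hk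
      have hadd : PySem.Set.add s k = s := by
        simp [PySem.Set.add, PySem.Set.contains, hk]
      have hfe : t.filter (fun y => y == k) = [k] := by
        rw [List.filter_beq, List.count_eq_one_of_mem htnd hkt, List.replicate_one]
      rw [hadd]
      have he : t.filter (fun y => decide (y < k)) ++ k :: t.filter (fun y => decide (k < y)) = t := by
        conv_rhs => rw [hdec, hfe]
        simp
      rw [he]; exact htperm
    · have hadd : PySem.Set.add s k = s ++ [k] := by
        simp [PySem.Set.add, PySem.Set.contains, hk]
      have hkt : k ∉ t := fun hc => hk ((PySem.List.mem_sorted s (fun y => y) false k).1 hc)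
      have hfe : t.filter (fun y => y == k) = [] := by
        rw [List.filter_eq_nil_iff]; intro y hy hc
        exact hkt (by simpa using (beq_iff_eq.1 hc ▸ hy))
      have hte : t = t.filter (fun y => decide (y < k)) ++ t.filter (fun y => decide (k < y)) := by
        conv_lhs => rw [hdec]
        simp [hfe]
      rw [hadd]
      refine List.Perm.trans ?_ ((htperm.cons k).trans (List.perm_append_singleton k s).symm)
      have hpm := List.perm_middle (a := k)
        (l₁ := t.filter (fun y => decide (y < k))) (l₂ := t.filter (fun y => decide (k < y)))
      rw [← hte] at hpm
      exact hpm
  · rw [List.pairwise_append]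
    refine ⟨ht.sublist List.filter_sublist, ?_, ?_⟩
    · rw [List.pairwise_cons]
      refine ⟨fun b hb => by simpa using (List.of_mem_filter hb), ht.sublist List.filter_sublist⟩
    · intro a ha b hb
      have ha' : a < k := by simpa using (List.of_mem_filter ha)
      rcases List.mem_cons.1 hb with rfl | hb
      · exact ha'
      · exact ha'.trans (by simpa using (List.of_mem_filter hb))

-- a stable sort by key is the flatten, over the sorted distinct keys, of the per-key groups
theorem pv_stable_sort_flatten {α κ : Type} [LinearOrder κ] [BEq κ] [LawfulBEq κ]
    (xs : List α) (key : α → κ) :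
    PySem.List.sorted xs key
    = (PySem.List.sorted (PySem.Set.ofList (xs.map key)) (fun k => k)).flatMap
        (fun k => xs.filter (fun x => key x == k)) := by
  induction xs using List.reverseRecOn with
  | nil => simp [PySem.List.sorted, PySem.Set.ofList]
  | append_singleton xs a ih =>
    have hLHS : PySem.List.sorted (xs ++ [a]) key
        = PySem.List.insertBy (fun p q => decide (key p < key q)) a (PySem.List.sorted xs key) := by
      rw [PySem.List.sorted_eq_foldl_insertBy (xs ++ [a]) key, List.foldl_append,
        ← PySem.List.sorted_eq_foldl_insertBy xs key]
      simp
    rw [hLHS, ih, List.map_append, List.map_cons, List.map_nil, pv_sorted_add_eq]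
    set k := key a with hkdef
    set t := PySem.List.sorted (PySem.Set.ofList (xs.map key)) (fun y : κ => y) with htdef
    set G : κ → List α := fun k' => xs.filter (fun x => key x == k') with hGdef
    set G' : κ → List α := fun k' => (xs ++ [a]).filter (fun x => key x == k') with hG'def
    have ht : t.Pairwise (· < ·) := PySem.List.sorted_ofList_pairwise_lt (xs.map key)
    have htperm : t.Perm (PySem.Set.ofList (xs.map key)) :=
      PySem.List.sorted_perm _ (fun y => y) false
    have htnd : t.Nodup := htperm.nodup_iff.2 (PySem.Set.nodup_ofList _)
    have hmemt : ∀ x, x ∈ t ↔ x ∈ xs.map key := fun x =>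
      (PySem.List.mem_sorted _ (fun y => y) false x).trans (PySem.Set.mem_ofList _ x)
    have hGlt : (t.filter (fun y => decide (y < k))).flatMap G'
        = (t.filter (fun y => decide (y < k))).flatMap G := by
      apply List.flatMap_congr; intro k' hk'
      have : k' < k := by simpa using List.of_mem_filter hk'
      have hne : ¬ key a = k' := hkdef ▸ (ne_of_gt this)
      simp [hG'def, hGdef, List.filter_append, hne]
    have hGgt : (t.filter (fun y => decide (k < y))).flatMap G'
        = (t.filter (fun y => decide (k < y))).flatMap G := by
      apply List.flatMap_congr; intro k' hk'
      have : k < k' := by simpa using List.of_mem_filter hk'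
      have hne : ¬ key a = k' := hkdef ▸ (ne_of_lt this)
      simp [hG'def, hGdef, List.filter_append, hne]
    have hGk : G' k = G k ++ [a] := by simp [hG'def, hGdef, List.filter_append, hkdef]
    have hsplit : t.flatMap G
        = (t.filter (fun y => decide (y < k))).flatMap G
          ++ (G k ++ (t.filter (fun y => decide (k < y))).flatMap G) := by
      conv_lhs => rw [pv_pairwise_lt_decomp t k ht]
      by_cases hk : k ∈ xs.map key
      · have hkt : k ∈ t := (hmemt k).2 hk
        have hfe : t.filter (fun y => y == k) = [k] := by
          rw [List.filter_beq, List.count_eq_one_of_mem htnd hkt, List.replicate_one]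
        simp [hfe]
      · have hfe : t.filter (fun y => y == k) = [] := by
          rw [List.filter_eq_nil_iff]; intro y hy hc
          have hyk : y = k := beq_iff_eq.1 hc
          exact hk (hyk ▸ (hmemt y).1 hy)
        have hGke : G k = [] := by
          rw [hGdef]; rw [List.filter_eq_nil_iff]; intro x hx hc
          exact hk (beq_iff_eq.1 hc ▸ List.mem_map_of_mem hx)
        simp [hfe, hGke]
    rw [hsplit, ← List.append_assoc]
    have hins := pv_insertBy_between key a
      ((t.filter (fun y => decide (y < k))).flatMap G ++ G k)
      ((t.filter (fun y => decide (k < y))).flatMap G) ?_ ?_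
    · rw [hins]
      simp only [List.flatMap_append, List.flatMap_cons, hGlt, hGgt, hGk]
      simp
    · intro y hy
      rcases List.mem_append.1 hy with hy | hy
      · rcases List.mem_flatMap.1 hy with ⟨k', hk', hyG⟩
        have h1 : k' < k := by simpa using List.of_mem_filter hk'
        have h2 : key y = k' := by simpa using List.of_mem_filter hyG
        rw [h2]; exact le_of_lt h1
      · have h2 : key y = k := by simpa using List.of_mem_filter hy
        rw [h2]
    · intro y hy
      rcases List.mem_flatMap.1 hy with ⟨k', hk', hyG⟩
      have h1 : k < k' := by simpa using List.of_mem_filter hk'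
      have h2 : key y = k' := by simpa using List.of_mem_filter hyG
      rw [h2]; exact h1

-- enumerating a mapped list is mapping over the enumeration
theorem pv_enumerate_map {α β : Type} (xs : List α) (f : α → β) (s : Int) :
    PySem.List.enumerate (xs.map f) s
    = (PySem.List.enumerate xs s).map (fun p => (p.1, f p.2)) := by
  induction xs generalizing s with
  | nil => simp [PySem.List.enumerate]
  | cons x t ih => simp [PySem.List.enumerate, ih]

-- the first components of an enumeration are distinct
theorem pv_enum_nodup_fst {α : Type} (xs : List α) (s : Int) :
    ((PySem.List.enumerate xs s).map (fun p => p.1)).Nodup := by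
  exact List.pairwise_map.2 ((PySem.List.pairwise_lt_enumerate xs s).imp (fun h => ne_of_lt h))

-- A's nested accumulation loop, as a flatMap of filtered rows
theorem pv_loopA (R : List Int) (c : Int → Int → String) :
    R.foldl (fun acc i => R.foldl (fun acc j =>
        if (c i j).toList ≠ [] then acc ++ [(c i j, i, j)] else acc) acc)
      ([] : List (String × Int × Int))
    = R.flatMap (fun i =>
        (R.filter (fun j => decide ((c i j).toList ≠ []))).map (fun j => (c i j, i, j))) := by
  have hfn : (fun (acc : List (String × Int × Int)) i => R.foldl (fun acc j =>
        if (c i j).toList ≠ [] then acc ++ [(c i j, i, j)] else acc) acc)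
      = (fun acc i => acc ++ (R.filter (fun j => decide ((c i j).toList ≠ []))).map
          (fun j => (c i j, i, j))) :=
    funext fun acc => funext fun i => PySem.List.foldl_append_ite _ _ _ _
  rw [hfn, PySem.List.foldl_append_eq_flatMap, List.nil_append]

-- B's character-collecting loop, as the set of the keys of the same flatMap
theorem pv_loopB_chars (R : List Int) (c : Int → Int → String) :
    R.foldl (fun s i => R.foldl (fun s j =>
        if (c i j).toList ≠ [] then PySem.Set.add s (c i j) else s) s)
      PySem.Set.empty
    = PySem.Set.ofList ((R.flatMap (fun i =>
        (R.filter (fun j => decide ((c i j).toList ≠ []))).map (fun j => (c i j, i, j)))).map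
        (fun q => q.1)) := by
  have h1 : ∀ (s : PySem.Set String) (i : Int),
      R.foldl (fun s j => if (c i j).toList ≠ [] then PySem.Set.add s (c i j) else s) s
      = ((R.filter (fun j => decide ((c i j).toList ≠ []))).map (fun j => c i j)).foldl
          PySem.Set.add s := by
    intro s i
    rw [PySem.List.foldl_ite_eq_foldl_filter (p := fun j => (c i j).toList ≠ []), List.foldl_map]
  have h2 : ((R.flatMap (fun i =>
        (R.filter (fun j => decide ((c i j).toList ≠ []))).map (fun j => (c i j, i, j)))).map
        (fun q => q.1))
      = R.flatMap (fun i =>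
        (R.filter (fun j => decide ((c i j).toList ≠ []))).map (fun j => c i j)) := by
    simp only [List.map_flatMap, List.map_map]
    rfl
  rw [h2, PySem.Set.ofList_eq_foldl, List.foldl_flatMap]
  apply PySem.List.foldl_congr_mem
  intro s i _
  exact h1 s i

-- B's per-character rescan of the matrix, as a fold over that character's group of positions
theorem pv_loopB_group (R : List Int) (c : Int → Int → String) (ch : String)
    (hch : ch.toList ≠ []) (st : PySem.Dict Int (Int × Int) × Int) :
    R.foldl (fun st i => R.foldl (fun st j =>
        if c i j == ch then (st.1.insert st.2 (i, j), st.2 + 1) else st) st) st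
    = (((R.flatMap (fun i =>
          (R.filter (fun j => decide ((c i j).toList ≠ []))).map (fun j => (c i j, i, j)))).filter
          (fun q => q.1 == ch)).map (fun q => q.2)).foldl
        (fun st v => (st.1.insert st.2 v, st.2 + 1)) st := by
  have hgrp : ((R.flatMap (fun i =>
        (R.filter (fun j => decide ((c i j).toList ≠ []))).map (fun j => (c i j, i, j)))).filter
        (fun q => q.1 == ch)).map (fun q => q.2)
      = R.flatMap (fun i => (R.filter (fun j => c i j == ch)).map (fun j => ((i : Int), j))) := by
    rw [List.filter_flatMap, List.map_flatMap]
    apply List.flatMap_congr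
    intro i _
    rw [List.filter_map, List.filter_filter, List.map_map]
    have hp : ∀ j, ((fun q : String × Int × Int => q.1 == ch) ∘ fun j => (c i j, i, j)) j
        = (c i j == ch) := fun j => rfl
    have hfil : R.filter (fun j => ((fun q : String × Int × Int => q.1 == ch) ∘
          fun j => (c i j, i, j)) j && decide ((c i j).toList ≠ []))
        = R.filter (fun j => c i j == ch) := by
      apply List.filter_congr
      intro j _
      rw [hp]
      by_cases h : c i j = ch
      · simp [h, hch]
      · simp [h]
    rw [hfil]
    rfl
  rw [hgrp, List.foldl_flatMap]
  apply PySem.List.foldl_congr_mem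
  intro st i _
  rw [List.foldl_map, ← PySem.List.foldl_if_eq_foldl_filter]

-- inserting values under a running integer index is inserting the enumeration
theorem pv_run_enum (vs : List (Int × Int)) (d : PySem.Dict Int (Int × Int)) (n : Int) :
    vs.foldl (fun st v => (st.1.insert st.2 v, st.2 + 1)) (d, n)
    = ((PySem.List.enumerate vs n).foldl (fun d q => d.insert q.1 q.2) d,
        n + (vs.length : Int)) := by
  induction vs generalizing d n with
  | nil => simp [PySem.List.enumerate]
  | cons v t ih =>
    simp only [List.foldl_cons, PySem.List.enumerate_cons, ih]
    congr 1
    simp only [List.length_cons]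
    push_cast
    ring

-- ===== VERDICT (by name: the statement is the Claim_ definition above) =====
theorem get_matrix_positions_spec : Claim_equal_get_matrix_positions := by
  intro matrix _ _
  show get_matrix_positions matrix = get_matrix_positions_alt matrix
  simp only [get_matrix_positions, get_matrix_positions_alt]
  rw [pv_loopA, pv_loopB_chars]
  set R := PySem.List.pyRange 0 (matrix.length : Int) 1
  set c : Int → Int → String := fun i j => PySem.List.pyGetD (PySem.List.pyGetD matrix i []) j ""
  set E : List (String × Int × Int) := R.flatMap (fun i =>
    (R.filter (fun j => decide ((c i j).toList ≠ []))).map (fun j => (c i j, i, j))) with hE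
  -- every sorted character comes from a nonempty cell
  have hmemE : ∀ ch ∈ PySem.List.sorted (PySem.Set.ofList (E.map (fun q => q.1))) (fun k => k),
      ch.toList ≠ [] := by
    intro ch hch
    have h1 : ch ∈ E.map (fun q => q.1) :=
      (PySem.Set.mem_ofList _ ch).1 ((PySem.List.mem_sorted _ (fun k => k) false ch).1 hch)
    rcases List.mem_map.1 h1 with ⟨q, hq, rfl⟩
    rcases List.mem_flatMap.1 hq with ⟨i, _, hq2⟩
    rcases List.mem_map.1 hq2 with ⟨j, hj, rfl⟩
    simpa using List.of_mem_filter hj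
  -- B's outer loop, rewritten per character and flattened into one run
  have hB : (PySem.List.sorted (PySem.Set.ofList (E.map (fun q => q.1))) (fun k => k)).foldl
        (fun st ch => R.foldl (fun st i => R.foldl (fun st j =>
          if c i j == ch then (st.1.insert st.2 (i, j), st.2 + 1) else st) st) st)
        ((PySem.Dict.empty : PySem.Dict Int (Int × Int)), 0)
      = (((PySem.List.sorted (PySem.Set.ofList (E.map (fun q => q.1))) (fun k => k)).flatMap
          (fun ch => (E.filter (fun q => q.1 == ch)).map (fun q => q.2))).foldl
          (fun st v => (st.1.insert st.2 v, st.2 + 1))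
          ((PySem.Dict.empty : PySem.Dict Int (Int × Int)), 0)) := by
    rw [List.foldl_flatMap]
    apply PySem.List.foldl_congr_mem
    intro st ch hch
    exact pv_loopB_group R c ch (hmemE ch hch) st
  rw [hB]
  -- the flattened groups are exactly the stable sort's positions
  have hflat : (PySem.List.sorted (PySem.Set.ofList (E.map (fun q => q.1))) (fun k => k)).flatMap
        (fun ch => (E.filter (fun q => q.1 == ch)).map (fun q => q.2))
      = (PySem.List.sorted E (fun q => q.1)).map (fun q => q.2) := by
    rw [pv_stable_sort_flatten E (fun q => q.1)]
    simp only [List.map_flatMap]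
  rw [hflat, pv_run_enum]
  -- both sides now insert fresh consecutive keys; read the dicts back as lists
  rw [PySem.Dict.items_foldl_insert_fresh
    (l := PySem.List.enumerate (PySem.List.sorted E (fun q => q.1)) 0)
    (k := fun p => p.1) (v := fun p => p.2.2) (d := PySem.Dict.empty)
    (fun a _ => PySem.Dict.contains_empty _) (pv_enum_nodup_fst _ _)]
  rw [PySem.Dict.items_foldl_insert_fresh
    (l := PySem.List.enumerate ((PySem.List.sorted E (fun q => q.1)).map (fun q => q.2)) 0)
    (k := fun q => q.1) (v := fun q => q.2) (d := PySem.Dict.empty)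
    (fun a _ => PySem.Dict.contains_empty _) (pv_enum_nodup_fst _ _)]
  rw [pv_enumerate_map]
  simp
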